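-- pv_equiv track=rewrite | github.com/kugomusic/Easy_Data | app/views/process.py | symbolRecognition
-- ===== SOURCE A (Python) =====
-- def symbolRecognition(splitStr):
--     splitSymbol = ''
--     symbolList = ['/', '-', '_', '#', '@', '!', '$', '|', '=', ',', '.', '*']
--     for i in list(splitStr):
--         if i in symbolList:
--             splitSymbol = i
--             break
--     return splitSymbol
-- ===== SOURCE B (Python) =====
-- def symbolRecognition(splitStr):
--     symbolList = ['/', '-', '_', '#', '@', '!', '$', '|', '=', ',', '.', '*']
--     best_i = -1
--     best_s = ''
--     for sym in symbolList:
--         i = splitStr.find(sym)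
--         if i != -1 and (best_i == -1 or i < best_i):
--             best_i, best_s = i, sym
--     return best_s
-- ===== Notes on version B (the rewrite author's own statement) =====
-- stated objective: faster
-- what changed: B inverts the traversal: instead of A's left-to-right Python scan over the string testing each character for membership in the symbol list, B iterates over the 12 symbols, takes str.find for each, and returns the symbol with the minimal first-occurrence index (empty string if all are -1).
import Mathlib
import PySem

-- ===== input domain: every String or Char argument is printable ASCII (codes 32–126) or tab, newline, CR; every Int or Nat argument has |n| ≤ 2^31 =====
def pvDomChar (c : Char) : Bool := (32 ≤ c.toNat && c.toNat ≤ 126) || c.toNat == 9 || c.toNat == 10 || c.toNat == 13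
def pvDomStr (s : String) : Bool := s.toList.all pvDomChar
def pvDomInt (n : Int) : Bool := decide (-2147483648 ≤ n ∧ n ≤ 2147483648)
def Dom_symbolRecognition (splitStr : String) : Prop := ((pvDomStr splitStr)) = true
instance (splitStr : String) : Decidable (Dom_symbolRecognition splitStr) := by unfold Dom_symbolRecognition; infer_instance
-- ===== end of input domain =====

-- B inverts the traversal: instead of A's scan over the string testing membership in
-- the symbol list, B iterates over the 12 symbols, asks str.find for each one's first
-- position, and keeps the symbol with the minimal position; measured faster (constant factor).

-- ===== PORT A =====
-- A's symbolList literal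
def pvSymbolList : List Char := ['/', '-', '_', '#', '@', '!', '$', '|', '=', ',', '.', '*']

-- A's for-loop with break: splitSymbol stays '' until the first list member is hit
def pvSymLoop : List Char → String
  | [] => ""
  | c :: rest => if pvSymbolList.contains c then String.ofList [c] else pvSymLoop rest

def symbolRecognition (splitStr : String) : String := pvSymLoop splitStr.toList

-- ===== PORT B =====
-- the loop body: i = splitStr.find(sym); update (best_i, best_s) when i is a new minimum
def pvBStep (splitStr : String) (st : Int × String) (sym : Char) : Int × String :=
  let i := PySem.Str.find splitStr (String.ofList [sym])
  if i ≠ -1 ∧ (st.1 = -1 ∨ i < st.1) then (i, String.ofList [sym]) else st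

def symbolRecognition_alt (splitStr : String) : String :=
  (pvSymbolList.foldl (pvBStep splitStr) (-1, "")).2

-- ===== PRECONDITION & SPEC =====
def Spec_symbolRecognition (splitStr : String) (out : String) : Prop := out = symbolRecognition_alt splitStr
instance (splitStr : String) (out : String) : Decidable (Spec_symbolRecognition splitStr out) := by unfold Spec_symbolRecognition; infer_instance

-- ===== CLAIM =====
def Claim_equal_symbolRecognition : Prop := ∀ (splitStr : String), Dom_symbolRecognition splitStr → Spec_symbolRecognition splitStr (symbolRecognition splitStr)

-- ===== LEMMAS AND PROOFS =====

-- a one-character string is nonempty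
theorem pv_ofList_ne (c : Char) : String.ofList [c] ≠ "" := by
  intro h
  have := congrArg String.toList h
  simp at this

-- unfolding pvSymLoop on a cons cell
theorem pvSymLoop_cons (c : Char) (rest : List Char) :
    pvSymLoop (c :: rest) = (if pvSymbolList.contains c then String.ofList [c] else pvSymLoop rest) := rfl

-- [c] is a prefix of t iff t starts with c
theorem pv_singleton_prefix {c : Char} {t : List Char} : [c] <+: t ↔ t.head? = some c := by
  cases t with
  | nil => simp
  | cons a t' =>
    constructor
    · rintro ⟨u, hu⟩; simp at hu; simp [hu.1]
    · intro h; simp at h; exact ⟨t', by simp [h]⟩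

-- [c] infix of l iff c ∈ l
theorem pv_singleton_infix {c : Char} {l : List Char} : [c] <:+: l ↔ c ∈ l := by
  constructor
  · intro h; exact h.subset (by simp)
  · intro h
    obtain ⟨s, t, hst⟩ := List.append_of_mem h
    exact ⟨s, t, by simp [hst]⟩

-- characterization of find l [c] as a first-index: from Chars.find_spec
theorem pv_find_single_eq {l : List Char} {c : Char} {j : ℕ}
    (hj : l[j]? = some c) (hmin : ∀ i < j, l[i]? ≠ some c) :
    PySem.Chars.find l [c] = (j : Int) := by
  have hmem : c ∈ l := by
    have := List.getElem?_eq_some_iff.mp hj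
    obtain ⟨h, hg⟩ := this; exact hg ▸ List.getElem_mem h
  have hnn : 0 ≤ PySem.Chars.find l [c] :=
    (PySem.Chars.find_nonneg_iff _ _).mpr (pv_singleton_infix.mpr hmem)
  obtain ⟨hpre, hless⟩ := PySem.Chars.find_spec (s := l) (sub := [c]) hnn
  set f := (PySem.Chars.find l [c]).toNat with hf
  have hfc : l[f]? = some c := by
    have := pv_singleton_prefix.mp hpre
    rwa [List.head?_drop] at this
  rcases lt_trichotomy f j with h | h | h
  · exact absurd hfc (hmin f h)
  · omega
  · exfalso
    exact hless j h (pv_singleton_prefix.mpr (by rwa [List.head?_drop]))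

-- find l [c] = -1 when c ∉ l
theorem pv_find_single_none {l : List Char} {c : Char} (h : c ∉ l) :
    PySem.Chars.find l [c] = -1 := by
  exact (PySem.Chars.find_eq_neg_one_iff _ _).mpr (fun hi => h (pv_singleton_infix.mp hi))

-- pvBStep in terms of the index function g sym = Chars.find l [sym]
theorem pvBStep_eq (s : String) (st : Int × String) (sym : Char) :
    pvBStep s st sym =
      (if PySem.Chars.find s.toList [sym] ≠ -1 ∧ (st.1 = -1 ∨ PySem.Chars.find s.toList [sym] < st.1)
       then (PySem.Chars.find s.toList [sym], String.ofList [sym]) else st) := by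
  simp [pvBStep, PySem.Str.find_eq]

-- FOLD LEMMA 1: if every remaining symbol is absent, the state never moves
theorem pv_fold_all_none (s : String) (syms : List Char)
    (h : ∀ c ∈ syms, PySem.Chars.find s.toList [c] = -1) (st : Int × String) :
    syms.foldl (pvBStep s) st = st := by
  induction syms generalizing st with
  | nil => rfl
  | cons a rest ih =>
    have ha := h a (by simp)
    simp only [List.foldl_cons, pvBStep_eq, ha]
    simp only [ne_eq, not_true_eq_false, false_and, if_false]
    exact ih (fun c hc => h c (by simp [hc])) st

-- FOLD LEMMA 2: a state already holding a minimum j is never displaced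
theorem pv_fold_stays (s : String) (syms : List Char) (j : Int) (w : String)
    (hj : 0 ≤ j)
    (h : ∀ c ∈ syms, PySem.Chars.find s.toList [c] = -1 ∨ j ≤ PySem.Chars.find s.toList [c]) :
    syms.foldl (pvBStep s) (j, w) = (j, w) := by
  induction syms with
  | nil => rfl
  | cons a rest ih =>
    have ha := h a (by simp)
    simp only [List.foldl_cons, pvBStep_eq]
    have hcond : ¬ (PySem.Chars.find s.toList [a] ≠ -1 ∧
        ((j, w).1 = -1 ∨ PySem.Chars.find s.toList [a] < (j, w).1)) := by
      rcases ha with h1 | h1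
      · simp_all
      · simp_all
        omega
    rw [if_neg hcond]
    exact ih (fun c hc => h c (by simp [hc]))

-- FOLD LEMMA 3: the unique strict minimum c₀ (at index j) is reached and kept
theorem pv_fold_reach (s : String) (syms : List Char) (c₀ : Char) (j : Int)
    (hj : 0 ≤ j) (hc : c₀ ∈ syms)
    (hg : PySem.Chars.find s.toList [c₀] = j)
    (hothers : ∀ c ∈ syms, c ≠ c₀ →
        PySem.Chars.find s.toList [c] = -1 ∨ j < PySem.Chars.find s.toList [c])
    (bi : Int) (w : String) (hbi : bi = -1 ∨ j < bi) :
    syms.foldl (pvBStep s) (bi, w) = (j, String.ofList [c₀]) := by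
  induction syms generalizing bi w with
  | nil => simp at hc
  | cons a rest ih =>
    by_cases ha : a = c₀
    · subst ha
      simp only [List.foldl_cons, pvBStep_eq, hg]
      have hcond : j ≠ -1 ∧ ((bi, w).1 = -1 ∨ j < (bi, w).1) := by
        constructor
        · omega
        · simpa using hbi
      rw [if_pos hcond]
      apply pv_fold_stays s rest j _ hj
      intro c hcr
      by_cases hca : c = a
      · subst hca; rw [hg]; right; exact le_refl j
      · rcases hothers c (by simp [hcr]) hca with h1 | h1
        · exact Or.inl h1
        · exact Or.inr (le_of_lt h1)
    · have hc' : c₀ ∈ rest := by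
        rcases List.mem_cons.mp hc with h1 | h1
        · exact absurd h1.symm ha
        · exact h1
      rcases hothers a (by simp) ha with h1 | h1
      · simp only [List.foldl_cons, pvBStep_eq, h1]
        simp only [ne_eq, not_true_eq_false, false_and, if_false]
        exact ih hc' (fun c hcr hne => hothers c (by simp [hcr]) hne) bi w hbi
      · simp only [List.foldl_cons, pvBStep_eq]
        by_cases hcond : PySem.Chars.find s.toList [a] ≠ -1 ∧
            ((bi, w).1 = -1 ∨ PySem.Chars.find s.toList [a] < (bi, w).1)
        · rw [if_pos hcond]
          exact ih hc' (fun c hcr hne => hothers c (by simp [hcr]) hne)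
            _ _ (Or.inr h1)
        · rw [if_neg hcond]
          exact ih hc' (fun c hcr hne => hothers c (by simp [hcr]) hne) bi w hbi

-- A's loop characterised: a first-index witness for the returned symbol
theorem pvSymLoop_some {l : List Char}
    (hc : pvSymLoop l ≠ "") :
    ∃ j : ℕ, ∃ c₀ : Char, l[j]? = some c₀ ∧ pvSymbolList.contains c₀ = true ∧
      pvSymLoop l = String.ofList [c₀] ∧
      (∀ i < j, ∀ c, l[i]? = some c → pvSymbolList.contains c = false) := by
  induction l with
  | nil => simp [pvSymLoop] at hc
  | cons a rest ih =>
    by_cases ha : pvSymbolList.contains a = true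
    · exact ⟨0, a, by simp, ha, by rw [pvSymLoop_cons, if_pos ha], by omega⟩
    · have hrec : pvSymLoop (a :: rest) = pvSymLoop rest := by
        rw [pvSymLoop_cons, if_neg (by simp_all)]
      obtain ⟨j, c₀, h1, h2, h3, h4⟩ := ih (by rwa [hrec] at hc)
      refine ⟨j + 1, c₀, by simpa using h1, h2, by rwa [hrec], ?_⟩
      intro i hi c hic
      cases i with
      | zero => simp at hic; simp_all
      | succ i' => exact h4 i' (by omega) c (by simpa using hic)

-- contains / membership bridge for the shared symbol literal
theorem pv_contains_mem {c : Char} :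
    pvSymbolList.contains c = true ↔ c ∈ pvSymbolList := by
  simp

-- ===== VERDICT =====
theorem symbolRecognition_spec : Claim_equal_symbolRecognition := by
  intro s _
  unfold Spec_symbolRecognition symbolRecognition symbolRecognition_alt
  by_cases hA : pvSymLoop s.toList = ""
  · rw [hA]
    have hnone : ∀ c ∈ pvSymbolList, PySem.Chars.find s.toList [c] = -1 := by
      intro c hc
      apply pv_find_single_none
      intro hmem
      -- c ∈ s.toList and c is a symbol would make pvSymLoop ≠ ""
      obtain ⟨u, v, huv⟩ := List.append_of_mem hmem
      have : pvSymLoop s.toList ≠ "" := by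
        rw [huv]; clear huv hmem
        induction u with
        | nil =>
          rw [List.nil_append, pvSymLoop_cons, if_pos (pv_contains_mem.mpr hc)]
          exact pv_ofList_ne c
        | cons b u' ihu =>
          rw [List.cons_append, pvSymLoop_cons]
          by_cases hb : pvSymbolList.contains b = true
          · rw [if_pos hb]; exact pv_ofList_ne b
          · rw [if_neg hb]; simpa using ihu
      exact this hA
    rw [pv_fold_all_none s pvSymbolList hnone]
  · obtain ⟨j, c₀, h1, h2, h3, h4⟩ := pvSymLoop_some (l := s.toList) hA
    rw [h3]
    have hgc₀ : PySem.Chars.find s.toList [c₀] = (j : Int) := by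
      apply pv_find_single_eq h1
      intro i hi hic
      have hF := h4 i hi c₀ hic
      rw [h2] at hF
      exact absurd hF (by decide)
    have hothers : ∀ c ∈ pvSymbolList, c ≠ c₀ →
        PySem.Chars.find s.toList [c] = -1 ∨ (j : Int) < PySem.Chars.find s.toList [c] := by
      intro c hc hne
      by_cases hmem : c ∈ s.toList
      · right
        have hnn : 0 ≤ PySem.Chars.find s.toList [c] :=
          (PySem.Chars.find_nonneg_iff _ _).mpr (pv_singleton_infix.mpr hmem)
        obtain ⟨hpre, _⟩ := PySem.Chars.find_spec (s := s.toList) (sub := [c]) hnn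
        have hfc : s.toList[(PySem.Chars.find s.toList [c]).toNat]? = some c := by
          have := pv_singleton_prefix.mp hpre
          rwa [List.head?_drop] at this
        set f := (PySem.Chars.find s.toList [c]).toNat with hfdef
        rcases lt_trichotomy f j with h | h | h
        · have hF := h4 f h c hfc
          rw [pv_contains_mem.mpr hc] at hF
          exact absurd hF (by decide)
        · exact absurd (h ▸ hfc ▸ rfl : s.toList[j]? = some c)
            (by rw [h1]; simpa using fun he => hne he.symm)
        · omega
      · exact Or.inl (pv_find_single_none hmem)
    rw [pv_fold_reach s pvSymbolList c₀ (j : Int) (by omega)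
      (pv_contains_mem.mp h2) hgc₀ hothers (-1) "" (Or.inl rfl)]
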